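-- pv_equiv track=rewrite | github.com/thakur-nishant/Coding-Challenges | SpreadsheetNotation.py | getSpreadsheetNotation
-- ===== SOURCE A (Python) =====
-- def getSpreadsheetNotation(n):
--     row = n // 702 + 1
--     col = n % 702
--     if col == 0:
--         return str(row-1)+"ZZ"
--     A_to_Z = [chr(i) for i in range(ord('A'), ord('Z') + 1)]
--
--     result = ""
--     while col > 0:
--         col -= 1
--         r = col % 26
--         col = col // 26
--         result = str(A_to_Z[r]) + result
--
--     return str(row)+result
-- ===== SOURCE B (Python) =====
-- def getSpreadsheetNotation(n):
--     q, r = divmod(n, 702)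
--     if r == 0:
--         row, col = q, 702
--     else:
--         row, col = q + 1, r
--     if col <= 26:
--         letters = chr(ord('A') + col - 1)
--     else:
--         c = col - 27
--         letters = chr(ord('A') + c // 26) + chr(ord('A') + c % 26)
--     return str(row) + letters
-- ===== Notes on version B (the rewrite author's own statement) =====
-- stated objective: simpler
-- what changed: Replaces A's while loop that extracts bijective base-26 digits one by one (and A's special-cased 'ZZ' return) with a uniform divmod split and a closed-form one-or-two-letter formula, since the column value is always at most 702.
import Mathlib
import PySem

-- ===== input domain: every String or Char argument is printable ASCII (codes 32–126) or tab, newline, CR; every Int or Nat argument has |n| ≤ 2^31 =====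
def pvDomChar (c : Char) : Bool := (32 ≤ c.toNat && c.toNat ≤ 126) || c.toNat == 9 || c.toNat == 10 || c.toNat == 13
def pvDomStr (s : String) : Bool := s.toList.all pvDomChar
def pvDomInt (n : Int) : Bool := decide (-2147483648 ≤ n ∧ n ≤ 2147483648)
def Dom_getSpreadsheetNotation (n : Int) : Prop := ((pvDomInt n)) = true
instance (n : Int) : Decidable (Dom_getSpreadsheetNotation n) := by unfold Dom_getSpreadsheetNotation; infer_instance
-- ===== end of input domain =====

-- B replaces A's digit-by-digit while loop with a closed two-letter formula (objective: simpler).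

-- ===== PORT A =====
-- chr(i): exact for the ASCII codes 65..90 that both programs use
def pvChr (i : Int) : String := String.ofList [Char.ofNat i.toNat]

-- A_to_Z = [chr(i) for i in range(ord('A'), ord('Z') + 1)]
def pvAtoZ : List String := (PySem.List.pyRange 65 91 1).map pvChr

-- the while loop: col > 0 → col -= 1; r = col % 26; col = col // 26; result = A_to_Z[r] + result
-- (the index r = (col-1) % 26 is always in [0,25], so the list indexing never raises)
def pvLoopA (col : Int) (result : String) : String :=
  if _h : col > 0 then
    pvLoopA (PySem.Int.floordiv (col - 1) 26)
      (((PySem.List.pyGet? pvAtoZ (PySem.Int.mod (col - 1) 26)).getD "") ++ result)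
  else result
termination_by col.toNat
decreasing_by
  have h2 : PySem.Int.floordiv (col - 1) 26 = (col - 1) / 26 :=
    PySem.Int.floordiv_eq_ediv_of_pos (by omega)
  have h3 : (col - 1) / 26 ≤ col - 1 := Int.ediv_le_self _ (by omega)
  have h4 : (0:Int) ≤ (col - 1) / 26 := Int.ediv_nonneg (by omega) (by omega)
  omega

def getSpreadsheetNotation (n : Int) : String :=
  let row := PySem.Int.floordiv n 702 + 1
  let col := PySem.Int.mod n 702
  if col = 0 then
    PySem.Int.toStr (row - 1) ++ "ZZ"
  else
    PySem.Int.toStr row ++ pvLoopA col ""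

-- ===== PORT B =====
def getSpreadsheetNotation_alt (n : Int) : String :=
  let q := PySem.Int.floordiv n 702
  let r := PySem.Int.mod n 702
  let rowcol : Int × Int := if r = 0 then (q, 702) else (q + 1, r)
  let letters :=
    if rowcol.2 ≤ 26 then pvChr (65 + rowcol.2 - 1)
    else
      let c := rowcol.2 - 27
      pvChr (65 + PySem.Int.floordiv c 26) ++ pvChr (65 + PySem.Int.mod c 26)
  PySem.Int.toStr rowcol.1 ++ letters

-- ===== PRECONDITION & SPEC =====
def Spec_getSpreadsheetNotation (n : Int) (out : String) : Prop := out = getSpreadsheetNotation_alt n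
instance (n : Int) (out : String) : Decidable (Spec_getSpreadsheetNotation n out) := by unfold Spec_getSpreadsheetNotation; infer_instance

-- ===== CLAIM (what is proved, stated in full; the proofs are below) =====
def Claim_equal_getSpreadsheetNotation : Prop := ∀ (n : Int), Dom_getSpreadsheetNotation n → Spec_getSpreadsheetNotation n (getSpreadsheetNotation n)

-- ===== LEMMAS AND PROOFS =====

theorem pvLoopA_stop (result : String) : pvLoopA 0 result = result := by
  rw [pvLoopA]; simp

theorem pvLoopA_step (col : Int) (result : String) (h : 0 < col) :
    pvLoopA col result =
      pvLoopA (PySem.Int.floordiv (col - 1) 26)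
        (((PySem.List.pyGet? pvAtoZ (PySem.Int.mod (col - 1) 26)).getD "") ++ result) := by
  rw [pvLoopA]; simp [h]

theorem pvLetter_fin : ∀ r : Fin 26,
    (PySem.List.pyGet? pvAtoZ ((r : Nat) : Int)).getD "" = pvChr (65 + ((r : Nat) : Int)) := by
  decide

theorem pvLetter_eq (r : Int) (h0 : 0 ≤ r) (h1 : r < 26) :
    (PySem.List.pyGet? pvAtoZ r).getD "" = pvChr (65 + r) := by
  have := pvLetter_fin ⟨r.toNat, by omega⟩
  simpa [show ((r.toNat : Nat) : Int) = r by omega] using this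

-- A's loop agrees with B's closed two-letter form on every column 1 ≤ c ≤ 701
theorem pvLoop_closed (c : Int) (h1 : 0 < c) (h2 : c < 702) :
    pvLoopA c "" =
      (if c ≤ 26 then pvChr (65 + c - 1)
       else pvChr (65 + PySem.Int.floordiv (c - 27) 26) ++ pvChr (65 + PySem.Int.mod (c - 27) 26)) := by
  have hmod : ∀ a : Int, PySem.Int.mod a 26 = a % 26 :=
    fun a => PySem.Int.mod_eq_emod_of_pos (by omega)
  have hdiv : ∀ a : Int, PySem.Int.floordiv a 26 = a / 26 :=
    fun a => PySem.Int.floordiv_eq_ediv_of_pos (by omega)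
  by_cases hc : c ≤ 26
  · -- one loop iteration
    rw [pvLoopA_step c "" h1, hmod, hdiv]
    have hm : (c - 1) % 26 = c - 1 := by omega
    have hd : (c - 1) / 26 = 0 := by omega
    rw [hm, hd, pvLoopA_stop, pvLetter_eq (c - 1) (by omega) (by omega)]
    simp [hc]
    ring_nf
  · -- two loop iterations
    rw [pvLoopA_step c "" h1, hmod, hdiv]
    have hdb : 0 < (c - 1) / 26 ∧ (c - 1) / 26 ≤ 26 := by omega
    rw [pvLoopA_step _ _ hdb.1, hmod, hdiv]
    have hm2 : ((c - 1) / 26 - 1) % 26 = (c - 1) / 26 - 1 := by omega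
    have hd2 : ((c - 1) / 26 - 1) / 26 = 0 := by omega
    rw [hm2, hd2, pvLoopA_stop,
        pvLetter_eq ((c - 1) % 26) (by omega) (by omega),
        pvLetter_eq ((c - 1) / 26 - 1) (by omega) (by omega)]
    rw [if_neg hc, hmod, hdiv]
    have e1 : 65 + ((c - 1) / 26 - 1) = 65 + (c - 27) / 26 := by omega
    have e2 : 65 + (c - 1) % 26 = 65 + (c - 27) % 26 := by omega
    rw [e1, e2]
    simp

-- ===== VERDICT (by name: the statement is the Claim_ definition above) =====
theorem getSpreadsheetNotation_spec : Claim_equal_getSpreadsheetNotation := by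
  unfold Claim_equal_getSpreadsheetNotation
  intro n _
  unfold Spec_getSpreadsheetNotation
  simp only [getSpreadsheetNotation, getSpreadsheetNotation_alt]
  have hr0 : 0 ≤ PySem.Int.mod n 702 := PySem.Int.mod_nonneg n (by omega)
  have hr1 : PySem.Int.mod n 702 < 702 := PySem.Int.mod_lt n (by omega)
  by_cases h : PySem.Int.mod n 702 = 0
  · rw [if_pos h, if_pos h]
    have hZZ : (if (702:Int) ≤ 26 then pvChr (65 + 702 - 1)
        else pvChr (65 + PySem.Int.floordiv (702 - 27) 26) ++ pvChr (65 + PySem.Int.mod (702 - 27) 26)) = "ZZ" := by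
      decide
    simp only [hZZ]
    congr 1
    ring_nf
  · rw [if_neg h, if_neg h]
    simp only []
    rw [pvLoop_closed (PySem.Int.mod n 702) (by omega) (by omega)]
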